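-- pv_equiv track=rewrite | github.com/Prosper1030/hpa-mdo | src/hpa_mdo/hifi/calculix_runner.py | _format_elset
-- ===== SOURCE A (Python) =====
-- from collections.abc import Iterable, Sequence
--
-- def _format_elset(name: str, element_ids: Sequence[int]) -> str:
--     lines = [f"*ELSET, ELSET={name}"]
--     chunk: list[str] = []
--     for element_id in element_ids:
--         chunk.append(str(int(element_id)))
--         if len(chunk) == 16:
--             lines.append(", ".join(chunk))
--             chunk = []
--     if chunk:
--         lines.append(", ".join(chunk))
--     return "\n".join(lines)
-- ===== SOURCE B (Python) =====
-- def _format_elset(name: str, element_ids) -> str: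
--     ids = [str(int(e)) for e in element_ids]
--     body = [", ".join(ids[i:i + 16]) for i in range(0, len(ids), 16)]
--     return "\n".join([f"*ELSET, ELSET={name}"] + body)
-- ===== Notes on version B (the rewrite author's own statement) =====
-- stated objective: idiomatic
-- what changed: Replaces the running-chunk accumulator with its length-16 flush check and trailing flush by materialising the stringified IDs once and chunking them by index slicing (range(0, len, 16) + ids[i:i+16]).
import Mathlib
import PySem

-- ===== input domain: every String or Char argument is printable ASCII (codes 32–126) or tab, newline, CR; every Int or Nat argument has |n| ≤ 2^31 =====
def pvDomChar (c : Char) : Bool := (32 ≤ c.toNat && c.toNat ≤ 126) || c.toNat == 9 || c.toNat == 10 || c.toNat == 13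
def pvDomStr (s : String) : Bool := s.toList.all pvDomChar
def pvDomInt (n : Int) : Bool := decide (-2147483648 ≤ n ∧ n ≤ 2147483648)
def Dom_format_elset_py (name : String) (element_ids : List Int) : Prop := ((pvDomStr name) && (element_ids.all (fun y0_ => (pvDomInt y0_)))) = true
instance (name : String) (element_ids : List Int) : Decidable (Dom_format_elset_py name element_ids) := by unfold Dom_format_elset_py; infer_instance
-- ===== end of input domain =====

-- B chunks the stringified IDs by index slicing instead of A's running-chunk accumulator with a flush check (idiomatic decomposition, same cost).

-- ===== PORT A =====
-- loop body of A: append str(int(e)) to chunk; flush chunk into lines when it reaches 16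
def pvStepA (st : List String × List String) (eid : Int) : List String × List String :=
  let chunk := st.2 ++ [PySem.Int.toStr eid]
  if chunk.length = 16 then (st.1 ++ [PySem.Str.join ", " chunk], [])
  else (st.1, chunk)

def format_elset_py (name : String) (element_ids : List Int) : String :=
  let st := element_ids.foldl pvStepA (["*ELSET, ELSET=" ++ name], [])
  let lines := if st.2 ≠ [] then st.1 ++ [PySem.Str.join ", " st.2] else st.1
  PySem.Str.join "\n" lines

-- ===== PORT B =====
def format_elset_py_alt (name : String) (element_ids : List Int) : String :=
  let ids := element_ids.map PySem.Int.toStr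
  let body := (PySem.List.pyRange 0 (ids.length : Int) 16).map
    (fun i => PySem.Str.join ", " (PySem.List.slice ids (some i) (some (i + 16))))
  PySem.Str.join "\n" (("*ELSET, ELSET=" ++ name) :: body)

-- ===== PRECONDITION & SPEC =====
def Spec_format_elset_py (name : String) (element_ids : List Int) (out : String) : Prop := out = format_elset_py_alt name element_ids
instance (name : String) (element_ids : List Int) (out : String) : Decidable (Spec_format_elset_py name element_ids out) := by unfold Spec_format_elset_py; infer_instance

-- ===== CLAIM (what is proved, stated in full; the proofs are below) =====
def Claim_equal_format_elset_py : Prop := ∀ (name : String) (element_ids : List Int), Dom_format_elset_py name element_ids → Spec_format_elset_py name element_ids (format_elset_py name element_ids)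

-- ===== LEMMAS AND PROOFS =====

-- the list of length-16 chunks of xs (last chunk may be shorter)
def pvChunks (xs : List String) : List (List String) :=
  if _h : xs = [] then [] else xs.take 16 :: pvChunks (xs.drop 16)
termination_by xs.length
decreasing_by
  cases xs with
  | nil => exact absurd rfl _h
  | cons a t => simp

theorem pvChunks_nil : pvChunks [] = [] := by simp [pvChunks]

theorem pvChunks_ne (xs : List String) (h : xs ≠ []) :
    pvChunks xs = xs.take 16 :: pvChunks (xs.drop 16) := by
  rw [pvChunks]; simp [h]

-- step-16 range unfolding
theorem pvRange16_cons (j n : Int) (h : j < n) :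
    PySem.List.pyRange j n 16 = j :: PySem.List.pyRange (j + 16) n 16 := by
  rw [PySem.List.pyRange_of_pos _ _ (by norm_num), PySem.List.pyRange_of_pos _ _ (by norm_num)]
  have hm : ((n - j + 16 - 1) / 16).toNat
      = (if j + 16 < n then ((n - (j + 16) + 16 - 1) / 16).toNat else 0) + 1 := by
    split_ifs with h2 <;> omega
  simp only [if_pos h, hm, List.range_succ_eq_map, List.map_cons, List.map_map]
  congr 1
  · simp
  · apply List.map_congr_left; intro k _; simp [Function.comp, Nat.succ_eq_add_one]; ring

theorem pvRange16_nil (j n : Int) (h : n ≤ j) : PySem.List.pyRange j n 16 = [] := by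
  rw [PySem.List.pyRange_of_pos _ _ (by norm_num)]
  rw [if_neg (by omega)]
  simp

-- B's index-sliced chunks from position j are the chunks of (ids.drop j)
theorem pvB_chunks (fuel : Nat) (ids : List String) (j : Nat) (hf : ids.length ≤ j + fuel) :
    (PySem.List.pyRange (j : Int) (ids.length : Int) 16).map
        (fun i => PySem.List.slice ids (some i) (some (i + 16)))
      = pvChunks (ids.drop j) := by
  induction fuel generalizing j with
  | zero =>
      have hj : ids.length ≤ j := by omega
      rw [pvRange16_nil _ _ (by exact_mod_cast hj)]
      simp [List.drop_eq_nil_of_le hj, pvChunks_nil]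
  | succ f ih =>
      by_cases hj : ids.length ≤ j
      · rw [pvRange16_nil _ _ (by exact_mod_cast hj)]
        simp [List.drop_eq_nil_of_le hj, pvChunks_nil]
      · have hj' : j < ids.length := by omega
        rw [pvRange16_cons _ _ (by exact_mod_cast hj'), List.map_cons]
        have hslice : PySem.List.slice ids (some (j : Int)) (some ((j : Int) + 16))
            = (ids.drop j).take 16 := by
          have := PySem.List.slice_natCast_add ids j 16
          exact_mod_cast this
        rw [hslice]
        have hc : ((j : Int) + 16) = ((j + 16 : Nat) : Int) := by push_cast; rfl
        rw [hc, ih (j + 16) (by omega)]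
        rw [pvChunks_ne (ids.drop j) (by
          intro hnil
          rw [List.drop_eq_nil_iff] at hnil
          omega)]
        rw [List.drop_drop]

-- A's accumulator loop, plus the trailing flush, appends exactly the joined chunks
theorem pvA_chunks (ids : List Int) (lines chunk : List String) (hc : chunk.length < 16) :
    (let st := ids.foldl pvStepA (lines, chunk);
     if st.2 ≠ [] then st.1 ++ [PySem.Str.join ", " st.2] else st.1)
      = lines ++ (pvChunks (chunk ++ ids.map PySem.Int.toStr)).map (PySem.Str.join ", ") := by
  induction ids generalizing lines chunk with
  | nil =>
      by_cases h : chunk = []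
      · simp [h, pvChunks_nil]
      · simp only [List.foldl_nil, List.map_nil, List.append_nil]
        rw [pvChunks_ne _ h]
        have : chunk.drop 16 = [] := List.drop_eq_nil_of_le (by omega)
        simp [h, this, pvChunks_nil, List.take_of_length_le (le_of_lt hc)]
  | cons x xs ih =>
      simp only [List.foldl_cons, List.map_cons]
      by_cases h16 : (chunk ++ [PySem.Int.toStr x]).length = 16
      · rw [show pvStepA (lines, chunk) x
              = (lines ++ [PySem.Str.join ", " (chunk ++ [PySem.Int.toStr x])], []) from by
            simp [pvStepA, h16]]
        rw [ih _ _ (by norm_num)]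
        rw [pvChunks_ne (chunk ++ PySem.Int.toStr x :: xs.map PySem.Int.toStr)
              (by simp)]
        have ht : (chunk ++ PySem.Int.toStr x :: xs.map PySem.Int.toStr).take 16
            = chunk ++ [PySem.Int.toStr x] := by
          rw [show chunk ++ PySem.Int.toStr x :: xs.map PySem.Int.toStr
                = (chunk ++ [PySem.Int.toStr x]) ++ xs.map PySem.Int.toStr from by simp]
          rw [List.take_append_of_le_length (by omega)]
          exact List.take_of_length_le (by omega)
        have hd : (chunk ++ PySem.Int.toStr x :: xs.map PySem.Int.toStr).drop 16
            = xs.map PySem.Int.toStr := by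
          rw [show chunk ++ PySem.Int.toStr x :: xs.map PySem.Int.toStr
                = (chunk ++ [PySem.Int.toStr x]) ++ xs.map PySem.Int.toStr from by simp]
          rw [List.drop_append_of_le_length (by omega)]
          simp [show chunk.length + 1 = 16 from by simpa using h16]
        rw [ht, hd]
        simp
      · have h15 : chunk.length ≠ 15 := by simp at h16; omega
        rw [show pvStepA (lines, chunk) x = (lines, chunk ++ [PySem.Int.toStr x]) from by
            simp [pvStepA, h15]]
        rw [ih _ _ (by simp; omega)]
        simp

-- ===== VERDICT (by name: the statement is the Claim_ definition above) =====
theorem format_elset_py_spec : Claim_equal_format_elset_py := by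
  intro name element_ids _
  unfold Spec_format_elset_py format_elset_py format_elset_py_alt
  have hA := pvA_chunks element_ids ["*ELSET, ELSET=" ++ name] [] (by norm_num)
  simp only [List.nil_append] at hA
  simp only []
  rw [hA]
  have hB := pvB_chunks (element_ids.map PySem.Int.toStr).length
      (element_ids.map PySem.Int.toStr) 0 (by omega)
  simp only [Nat.cast_zero, List.drop_zero] at hB
  have hB2 := congrArg (List.map (PySem.Str.join ", ")) hB
  rw [List.map_map] at hB2
  simp only [Function.comp_def] at hB2
  rw [hB2]
  rfl
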